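-- pv_equiv track=rewrite | github.com/v0gd/lang | videos/narration_extractor.py | get_token_in_quotes
-- ===== SOURCE A (Python) =====
-- def get_token_in_quotes(token: str):
--     prefix_pos = 0
--     for i in range(len(token)):
--         if token[i].isalnum():
--             prefix_pos = i
--             break
--     suffix_pos = 0
--     for i in range(len(token) - 1, -1, -1):
--         if token[i].isalnum():
--             suffix_pos = i
--             break
--     if prefix_pos > suffix_pos:
--         return token
--     return f"{token[:prefix_pos]}'{token[prefix_pos:suffix_pos + 1]}'{token[suffix_pos + 1:]}"
-- ===== SOURCE B (Python) =====
-- def get_token_in_quotes(token: str):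
--     idxs = [i for i, c in enumerate(token) if c.isalnum()]
--     p, s = (idxs[0], idxs[-1]) if idxs else (0, 0)
--     return f"{token[:p]}'{token[p:s + 1]}'{token[s + 1:]}"
-- ===== Notes on version B (the rewrite author's own statement) =====
-- stated objective: simpler
-- what changed: Replaces A's two opposite-direction break-loops (forward for the first alnum index, backward for the last) with one comprehension collecting all alnum indices and taking its first and last element, dropping A's unreachable early-return branch.
import Mathlib
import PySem

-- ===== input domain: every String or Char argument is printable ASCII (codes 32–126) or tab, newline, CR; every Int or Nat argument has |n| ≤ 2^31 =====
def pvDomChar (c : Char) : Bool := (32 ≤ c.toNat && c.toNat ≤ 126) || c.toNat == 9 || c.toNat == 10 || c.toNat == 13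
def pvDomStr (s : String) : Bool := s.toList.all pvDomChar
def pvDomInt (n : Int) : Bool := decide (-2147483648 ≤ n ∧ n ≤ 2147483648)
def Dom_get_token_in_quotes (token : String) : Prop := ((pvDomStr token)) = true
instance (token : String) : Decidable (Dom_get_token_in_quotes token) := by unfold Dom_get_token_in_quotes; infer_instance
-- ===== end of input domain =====

-- B replaces A's two opposite-direction break-loops by one comprehension collecting the
-- alnum indices and taking its first/last element (objective: simpler, same O(n) cost).

-- ===== PORT A =====
-- shared index/char pairing helper (Python's positional access / enumerate)
def pvEnumFrom : Nat → List Char → List (Nat × Char)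
  | _, [] => []
  | i, c :: cs => (i, c) :: pvEnumFrom (i + 1) cs

-- first loop: 'for i in range(len(token)): if token[i].isalnum(): prefix_pos = i; break'
-- (scan forward from index i0; falls off the loop with the default 0)
def pvAPrefix : List Char → Nat → Nat
  | [], _ => 0
  | c :: cs, i => if PySem.Chars.isalnum c then i else pvAPrefix cs (i + 1)

-- second loop: 'for i in range(len(token)-1, -1, -1): …' — scan the reversed enumerate
def pvASuffix : List (Nat × Char) → Nat
  | [] => 0
  | (i, c) :: rest => if PySem.Chars.isalnum c then i else pvASuffix rest

-- slices token[:p], token[p:s+1], token[s+1:] ported as take/drop: exact, bounds are Nats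
def get_token_in_quotes (token : String) : String :=
  let cs := token.toList
  let prefix_pos := pvAPrefix cs 0
  let suffix_pos := pvASuffix (pvEnumFrom 0 cs).reverse
  if suffix_pos < prefix_pos then token
  else String.mk (cs.take prefix_pos ++ '\'' :: ((cs.drop prefix_pos).take (suffix_pos + 1 - prefix_pos)) ++ '\'' :: cs.drop (suffix_pos + 1))

-- ===== PORT B =====
def get_token_in_quotes_alt (token : String) : String :=
  let cs := token.toList
  let idxs := ((pvEnumFrom 0 cs).filter (fun p => PySem.Chars.isalnum p.2)).map (·.1)
  let ps : Nat × Nat := match idxs with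
    | [] => (0, 0)
    | h :: _ => (h, idxs.getLastD 0)
  String.mk (cs.take ps.1 ++ '\'' :: ((cs.drop ps.1).take (ps.2 + 1 - ps.1)) ++ '\'' :: cs.drop (ps.2 + 1))

-- ===== PRECONDITION & SPEC =====
def Spec_get_token_in_quotes (token : String) (out : String) : Prop := out = get_token_in_quotes_alt token
instance (token : String) (out : String) : Decidable (Spec_get_token_in_quotes token out) := by unfold Spec_get_token_in_quotes; infer_instance

-- ===== CLAIM (what is proved, stated in full; the proofs are below) =====
def Claim_equal_get_token_in_quotes : Prop := ∀ (token : String), Dom_get_token_in_quotes token → Spec_get_token_in_quotes token (get_token_in_quotes token)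

-- ===== LEMMAS AND PROOFS =====

def pvIdxs (i : Nat) (cs : List Char) : List Nat :=
  ((pvEnumFrom i cs).filter (fun p => PySem.Chars.isalnum p.2)).map (·.1)

theorem pvIdxs_nil (i : Nat) : pvIdxs i [] = [] := rfl

theorem pvIdxs_cons (i : Nat) (c : Char) (cs : List Char) :
    pvIdxs i (c :: cs) =
      if PySem.Chars.isalnum c then i :: pvIdxs (i + 1) cs else pvIdxs (i + 1) cs := by
  simp [pvIdxs, pvEnumFrom, List.filter_cons]
  split <;> simp

-- A's forward loop computes the head of the index list (default 0)
theorem pvAPrefix_eq (cs : List Char) (i : Nat) :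
    pvAPrefix cs i = (pvIdxs i cs).headD 0 := by
  induction cs generalizing i with
  | nil => rfl
  | cons c cs ih =>
    rw [pvIdxs_cons]
    by_cases h : PySem.Chars.isalnum c = true <;> simp [pvAPrefix, h, ih]

-- A's backward loop scans the reversed pair list; generally it computes the head of
-- the filtered reversed list
theorem pvASuffix_eq_headD (l : List (Nat × Char)) :
    pvASuffix l = ((l.filter (fun p => PySem.Chars.isalnum p.2)).map (·.1)).headD 0 := by
  induction l with
  | nil => rfl
  | cons p l ih =>
    obtain ⟨i, c⟩ := p
    by_cases h : PySem.Chars.isalnum c = true <;>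
      simp [pvASuffix, h, ih]

theorem pv_rev_headD (xs : List Nat) : xs.reverse.headD 0 = xs.getLastD 0 := by
  cases xs with
  | nil => rfl
  | cons a t =>
    rw [List.headD_eq_head?, List.head?_reverse, List.getLastD_eq_getLast?,
        List.getLast?_eq_some_getLast (l := a :: t) (by simp)]

theorem pvASuffix_eq (cs : List Char) (i : Nat) :
    pvASuffix (pvEnumFrom i cs).reverse = (pvIdxs i cs).getLastD 0 := by
  rw [pvASuffix_eq_headD]
  simp only [List.filter_reverse, List.map_reverse]
  exact pv_rev_headD (pvIdxs i cs)

-- every collected index is ≥ the start index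
theorem pvIdxs_ge (cs : List Char) (i : Nat) : ∀ x ∈ pvIdxs i cs, i ≤ x := by
  induction cs generalizing i with
  | nil => simp [pvIdxs_nil]
  | cons c cs ih =>
    rw [pvIdxs_cons]
    intro x hx
    by_cases h : PySem.Chars.isalnum c = true
    · simp [h] at hx
      rcases hx with rfl | hx
      · exact le_refl x
      · exact le_trans (Nat.le_succ i) (ih (i + 1) x hx)
    · simp [h] at hx
      exact le_trans (Nat.le_succ i) (ih (i + 1) x hx)

-- the collected index list is weakly sorted
theorem pvIdxs_pairwise (cs : List Char) (i : Nat) : (pvIdxs i cs).Pairwise (· ≤ ·) := by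
  induction cs generalizing i with
  | nil => simp [pvIdxs_nil]
  | cons c cs ih =>
    rw [pvIdxs_cons]
    by_cases h : PySem.Chars.isalnum c = true
    · simp only [h, if_true]
      refine List.Pairwise.cons ?_ (ih (i + 1))
      intro x hx
      exact le_trans (Nat.le_succ i) (pvIdxs_ge cs (i + 1) x hx)
    · simpa [h] using ih (i + 1)

-- head ≤ last in the index list: A's early-return branch never fires
theorem pv_head_le_last (i : Nat) (cs : List Char) :
    (pvIdxs i cs).headD 0 ≤ (pvIdxs i cs).getLastD 0 := by
  have hp := pvIdxs_pairwise cs i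
  cases h : pvIdxs i cs with
  | nil => simp
  | cons a l =>
    rw [h] at hp
    have hmem : (a :: l).getLastD 0 ∈ a :: l := by
      rw [List.getLastD_eq_getLast?, List.getLast?_eq_some_getLast (l := a :: l) (by simp)]
      simp [List.getLast_mem]
    show (a :: l).headD 0 ≤ (a :: l).getLastD 0
    rcases List.mem_cons.mp hmem with heq | hmem'
    · rw [show ((a :: l).headD 0) = a from rfl, heq]
    · exact (List.pairwise_cons.mp hp).1 _ hmem'

-- ===== VERDICT (by name: the statement is the Claim_ definition above) =====
theorem get_token_in_quotes_spec : Claim_equal_get_token_in_quotes := by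
  intro token _
  unfold Spec_get_token_in_quotes get_token_in_quotes get_token_in_quotes_alt
  simp only []
  rw [pvAPrefix_eq, pvASuffix_eq]
  rw [show (((pvEnumFrom 0 token.toList).filter (fun p => PySem.Chars.isalnum p.2)).map (·.1)) = pvIdxs 0 token.toList from rfl]
  have hle := pv_head_le_last 0 token.toList
  rw [if_neg (by omega)]
  cases h : pvIdxs 0 token.toList with
  | nil => rfl
  | cons a l => rfl
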